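-- pv_equiv track=rewrite | github.com/Sujeong-Baek/Practice | 인프런-코딩테스트/구현/위험 지역.py | solution
-- ===== SOURCE A (Python) =====
-- def solution(board):
--     R=C=5
--     answer=0
--     for r in range(R):
--         for c in range(C):
--             if board[r][c] == 1:
--                 for dr, dc in [(1,0),(-1,0),(0,1),(0,-1),(1,1),(1,-1),(-1,1),(-1,-1)]:
--                     nr=r+dr
--                     nc=c+dc
--                     if 0<=nr<R and 0<=nc<C and board[nr][nc]==0:
--                        answer+=1
--                        board[nr][nc]=2
--
--     return answer
-- ===== SOURCE B (Python) =====
-- def solution(board):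
--     # Pure one-pass count driven from the zero cells (A drives from the 1-cells and
--     # marks counted zeros with 2; unlike A, this does NOT mutate `board`).
--     nbrs = [(1, 0), (-1, 0), (0, 1), (0, -1), (1, 1), (1, -1), (-1, 1), (-1, -1)]
--     return sum(
--         1
--         for r in range(5)
--         for c in range(5)
--         if board[r][c] == 0
--         and any(0 <= r + dr < 5 and 0 <= c + dc < 5 and board[r + dr][c + dc] == 1
--                 for dr, dc in nbrs)
--     )
-- ===== Notes on version B (the rewrite author's own statement) =====
-- stated objective: simpler
-- what changed: B inverts the traversal: instead of A's stateful scan from 1-cells that mutates counted zeros to 2 to deduplicate, B purely counts the zero cells that have an in-range 1-neighbour in a single comprehension (no mutation of board).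
import Mathlib
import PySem

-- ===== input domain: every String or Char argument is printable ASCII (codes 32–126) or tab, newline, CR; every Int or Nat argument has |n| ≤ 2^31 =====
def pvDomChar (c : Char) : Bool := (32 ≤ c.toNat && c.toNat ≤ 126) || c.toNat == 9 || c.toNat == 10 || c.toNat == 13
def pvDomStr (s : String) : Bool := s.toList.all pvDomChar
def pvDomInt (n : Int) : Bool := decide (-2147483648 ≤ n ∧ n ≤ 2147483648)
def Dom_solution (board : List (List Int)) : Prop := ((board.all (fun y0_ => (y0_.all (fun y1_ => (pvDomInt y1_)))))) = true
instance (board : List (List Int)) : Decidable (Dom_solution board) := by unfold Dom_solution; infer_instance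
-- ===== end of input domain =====

-- B replaces A's mutating scan from the 1-cells (zeros marked 2 to deduplicate) by a pure
-- count of the zero cells having an in-range 1-neighbour; equivalence is about the RETURN
-- value only — Python A mutates `board` in place, Python B does not.

-- ===== PORT A =====
-- the 8 neighbour offsets, shared literal of both Pythons
def pvOffs : List (Int × Int) := [(1,0),(-1,0),(0,1),(0,-1),(1,1),(1,-1),(-1,1),(-1,-1)]

-- board[r][c]; every read of either port has 0 ≤ r,c < 5, in range under Pre_, where pyGetD is exact
def pvGet (b : List (List Int)) (r c : Int) : Int :=
  PySem.List.pyGetD (PySem.List.pyGetD b r []) c 0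

-- board[r][c] = 2 (in range under Pre_, where pySetD is exact)
def pvSet2 (b : List (List Int)) (r c : Int) : List (List Int) :=
  PySem.List.pySetD b r (PySem.List.pySetD (PySem.List.pyGetD b r []) c 2)

-- body of A's innermost loop over the offsets
def pvNbrStep (r c : Int) (s : List (List Int) × Int) (dd : Int × Int) :
    List (List Int) × Int :=
  let nr := r + dd.1
  let nc := c + dd.2
  if 0 ≤ nr ∧ nr < 5 ∧ 0 ≤ nc ∧ nc < 5 ∧ pvGet s.1 nr nc = 0 then
    (pvSet2 s.1 nr nc, s.2 + 1)
  else s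

-- A's body for one cell (r,c): if board[r][c]==1, scan the 8 neighbours
def pvCenter (s : List (List Int) × Int) (r c : Int) : List (List Int) × Int :=
  if pvGet s.1 r c = 1 then pvOffs.foldl (pvNbrStep r c) s else s

def solution (board : List (List Int)) : Int :=
  ((PySem.List.pyRange 0 5 1).foldl (fun s r =>
      (PySem.List.pyRange 0 5 1).foldl (fun s c => pvCenter s r c) s)
    (board, (0 : Int))).2

-- ===== PORT B =====
-- `any(...)` over the offsets: some in-range neighbour of (r,c) holds a 1
def pvHasOneNbr (board : List (List Int)) (r c : Int) : Bool :=
  pvOffs.any (fun dd =>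
    decide (0 ≤ r + dd.1 ∧ r + dd.1 < 5 ∧ 0 ≤ c + dd.2 ∧ c + dd.2 < 5 ∧
            pvGet board (r + dd.1) (c + dd.2) = 1))

def solution_alt (board : List (List Int)) : Int :=
  (PySem.List.pyRange 0 5 1).foldl (fun acc r =>
    (PySem.List.pyRange 0 5 1).foldl (fun acc c =>
      if pvGet board r c = 0 ∧ pvHasOneNbr board r c = true then acc + 1 else acc) acc)
    (0 : Int)

-- ===== PRECONDITION & SPEC =====
-- Pre_ excludes exactly the boards on which A raises IndexError: fewer than 5 rows, or one
-- of the first 5 rows shorter than 5 (A reads board[r][c] for all 0 ≤ r,c < 5).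
def Pre_solution (board : List (List Int)) : Prop :=
  5 ≤ board.length ∧ ∀ row ∈ board.take 5, 5 ≤ row.length

instance (board : List (List Int)) : Decidable (Pre_solution board) := by
  unfold Pre_solution; infer_instance

def pvWitness_solution : List (List Int) :=
  [[0,1,0,0,0],[0,0,0,0,0],[0,0,1,0,0],[0,0,0,0,0],[0,0,0,0,2]]

def Spec_solution (board : List (List Int)) (out : Int) : Prop := out = solution_alt board
instance (board : List (List Int)) (out : Int) : Decidable (Spec_solution board out) := by
  unfold Spec_solution; infer_instance

-- ===== CLAIM (what is proved, stated in full; the proofs are below) =====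
def Claim_equal_solution : Prop :=
  ∀ (board : List (List Int)), Dom_solution board → Pre_solution board →
    Spec_solution board (solution board)

-- ===== LEMMAS AND PROOFS =====

-- the 5×5 grid of coordinates, as a finite set
def pvAllCells : List (Int × Int) :=
  (PySem.List.pyRange 0 5 1).flatMap (fun r => (PySem.List.pyRange 0 5 1).map (fun c => (r, c)))

def pvGrid : Finset (Int × Int) := pvAllCells.toFinset

-- the cells A has marked (and counted) after processing a list of centers `L`:
-- the zero cells of the original board adjacent to some 1-cell among `L`
def pvMarked (board : List (List Int)) (L : List (Int × Int)) : Finset (Int × Int) :=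
  pvGrid.filter (fun z => pvGet board z.1 z.2 = 0 ∧
    ∃ p ∈ L, pvGet board p.1 p.2 = 1 ∧ ∃ d ∈ pvOffs, z = (p.1 + d.1, p.2 + d.2))

-- invariant tying A's running state to the set S of already-marked cells
def pvInv (board : List (List Int)) (S : Finset (Int × Int))
    (s : List (List Int) × Int) : Prop :=
  s.1.length = board.length ∧
  (∀ i : Nat, (s.1.getD i []).length = (board.getD i []).length) ∧
  (∀ z ∈ pvGrid, pvGet s.1 z.1 z.2 = if z ∈ S then 2 else pvGet board z.1 z.2) ∧
  (∀ z ∈ S, z ∈ pvGrid ∧ pvGet board z.1 z.2 = 0) ∧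
  s.2 = (S.card : Int)

theorem pvMem_allCells (z : Int × Int) :
    z ∈ pvAllCells ↔ (0 ≤ z.1 ∧ z.1 < 5 ∧ 0 ≤ z.2 ∧ z.2 < 5) := by
  obtain ⟨r, c⟩ := z
  simp [pvAllCells, List.mem_flatMap, List.mem_map, PySem.List.mem_pyRange_one]; tauto

theorem pvMem_grid (z : Int × Int) : z ∈ pvGrid ↔ (0 ≤ z.1 ∧ z.1 < 5 ∧ 0 ≤ z.2 ∧ z.2 < 5) := by
  simp [pvGrid, List.mem_toFinset, pvMem_allCells]

theorem pvGetD_set {α : Type} (l : List α) (i j : Nat) (v d : α) :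
    (l.set i v).getD j d = if i = j ∧ j < l.length then v else l.getD j d := by
  simp [List.getD_eq_getElem?_getD, List.getElem?_set]
  split_ifs <;> simp_all

theorem pvGet_eq (b : List (List Int)) (r c : Int) (hr : 0 ≤ r) (hc : 0 ≤ c) :
    pvGet b r c = ((b.getD r.toNat []).getD c.toNat 0) := by
  simp [pvGet, PySem.List.pyGetD_of_nonneg _ _ hr, PySem.List.pyGetD_of_nonneg _ _ hc]

theorem pvSet2_len (b : List (List Int)) (r c : Int) (hr : 0 ≤ r) :
    (pvSet2 b r c).length = b.length := by
  simp [pvSet2, PySem.List.pySetD_of_nonneg _ _ hr]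

theorem pvSet2_row_len (b : List (List Int)) (r c : Int) (hr : 0 ≤ r) (hc : 0 ≤ c)
    (i : Nat) : ((pvSet2 b r c).getD i []).length = (b.getD i []).length := by
  simp only [pvSet2, PySem.List.pySetD_of_nonneg _ _ hr, PySem.List.pySetD_of_nonneg _ _ hc,
    PySem.List.pyGetD_of_nonneg _ _ hr]
  rw [pvGetD_set]
  split_ifs with h
  · rw [h.1.symm]; simp
  · rfl

theorem pvGet_set2 (b : List (List Int)) (r c r' c' : Int)
    (hr : 0 ≤ r) (hc : 0 ≤ c) (hr' : 0 ≤ r') (hc' : 0 ≤ c')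
    (hrb : r.toNat < b.length) (hcb : c.toNat < (b.getD r.toNat []).length) :
    pvGet (pvSet2 b r c) r' c' = if r' = r ∧ c' = c then 2 else pvGet b r' c' := by
  simp only [pvSet2, PySem.List.pySetD_of_nonneg _ _ hr, PySem.List.pySetD_of_nonneg _ _ hc,
    PySem.List.pyGetD_of_nonneg _ _ hr, pvGet_eq _ _ _ hr' hc']
  rw [pvGetD_set]
  by_cases hre : r' = r
  · subst hre
    rw [if_pos ⟨rfl, hrb⟩, pvGetD_set]
    by_cases hce : c' = c
    · subst hce
      rw [if_pos ⟨rfl, hcb⟩, if_pos ⟨rfl, rfl⟩]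
    · have hc2 : ¬ (c.toNat = c'.toNat ∧ c'.toNat < (b.getD r'.toNat []).length) := by
        intro h; exact hce (by omega)
      rw [if_neg hc2, if_neg (by tauto)]
  · have hn : ¬ (r.toNat = r'.toNat ∧ r'.toNat < b.length) := by
      intro h; exact hre (by omega)
    rw [if_neg hn, if_neg (by tauto)]

theorem pvPre_bounds (board : List (List Int)) (hPre : Pre_solution board) (r c : Int)
    (h : 0 ≤ r ∧ r < 5 ∧ 0 ≤ c ∧ c < 5) :
    r.toNat < board.length ∧ c.toNat < (board.getD r.toNat []).length := by
  obtain ⟨hlen, hrow⟩ := hPre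
  have h1 : r.toNat < board.length := by omega
  refine ⟨h1, ?_⟩
  have hmem : board.getD r.toNat [] ∈ board.take 5 := by
    have h5 : r.toNat < (board.take 5).length := by simp [List.length_take]; omega
    have : (board.take 5)[r.toNat] = board[r.toNat] := List.getElem_take
    rw [List.getD_eq_getElem?_getD, List.getElem?_eq_getElem h1, Option.getD_some, ← this]
    exact List.getElem_mem h5
  have := hrow _ hmem; omega

-- one offset step preserves the invariant, enlarging S by the cell it (would) mark
theorem pvNbr_step (board : List (List Int)) (hPre : Pre_solution board)
    (S : Finset (Int × Int)) (s : List (List Int) × Int) (p d : Int × Int)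
    (hInv : pvInv board S s) :
    pvInv board (S ∪ pvGrid.filter (fun z => pvGet board z.1 z.2 = 0 ∧
        z = (p.1 + d.1, p.2 + d.2))) (pvNbrStep p.1 p.2 s d) := by
  obtain ⟨hlen, hrows, hmask, hsub, hans⟩ := hInv
  set nr := p.1 + d.1 with hnr
  set nc := p.2 + d.2 with hnc
  by_cases hC : 0 ≤ nr ∧ nr < 5 ∧ 0 ≤ nc ∧ nc < 5 ∧ pvGet s.1 nr nc = 0
  · obtain ⟨h1, h2, h3, h4, h5⟩ := hC
    have hzgrid : ((nr, nc) : Int × Int) ∈ pvGrid := (pvMem_grid _).mpr ⟨h1, h2, h3, h4⟩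
    have hmz := hmask _ hzgrid
    have hznS : ((nr, nc) : Int × Int) ∉ S := by
      intro hzS; rw [if_pos hzS] at hmz; rw [hmz] at h5; exact absurd h5 (by norm_num)
    have horig : pvGet board nr nc = 0 := by rw [if_neg hznS] at hmz; rw [← hmz]; exact h5
    have hX : S ∪ pvGrid.filter (fun z => pvGet board z.1 z.2 = 0 ∧ z = (nr, nc))
        = insert ((nr, nc) : Int × Int) S := by
      ext w
      simp only [Finset.mem_union, Finset.mem_filter, Finset.mem_insert]
      constructor
      · rintro (h | ⟨_, _, rfl⟩); exacts [Or.inr h, Or.inl rfl]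
      · rintro (rfl | h); exacts [Or.inr ⟨hzgrid, horig, rfl⟩, Or.inl h]
    rw [hX]
    have hstep : pvNbrStep p.1 p.2 s d = (pvSet2 s.1 nr nc, s.2 + 1) := by
      simp only [pvNbrStep, ← hnr, ← hnc]; rw [if_pos ⟨h1, h2, h3, h4, h5⟩]
    rw [hstep]
    have hbb := pvPre_bounds board hPre nr nc ⟨h1, h2, h3, h4⟩
    have hb1 : nr.toNat < s.1.length := by rw [hlen]; exact hbb.1
    have hb2 : nc.toNat < (s.1.getD nr.toNat []).length := by rw [hrows]; exact hbb.2
    refine ⟨?_, ?_, ?_, ?_, ?_⟩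
    · rw [pvSet2_len _ _ _ h1]; exact hlen
    · intro i; rw [pvSet2_row_len _ _ _ h1 h3]; exact hrows i
    · intro w hw
      obtain ⟨hw1, hw2, hw3, hw4⟩ := (pvMem_grid w).mp hw
      show pvGet (pvSet2 s.1 nr nc) w.1 w.2 = _
      rw [pvGet_set2 _ _ _ _ _ h1 h3 hw1 hw3 hb1 hb2]
      by_cases hwz : w = ((nr, nc) : Int × Int)
      · subst hwz
        rw [if_pos ⟨rfl, rfl⟩, if_pos (Finset.mem_insert_self _ _)]
      · have hne : ¬ (w.1 = nr ∧ w.2 = nc) := by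
          intro h; exact hwz (Prod.ext_iff.mpr ⟨h.1, h.2⟩)
        rw [if_neg hne, hmask w hw]
        by_cases hwS : w ∈ S
        · rw [if_pos hwS, if_pos (Finset.mem_insert_of_mem hwS)]
        · rw [if_neg hwS, if_neg (fun h => (Finset.mem_insert.mp h).elim hwz hwS)]
    · intro w hw
      rcases Finset.mem_insert.mp hw with rfl | h
      exacts [⟨hzgrid, horig⟩, hsub w h]
    · show s.2 + 1 = _
      rw [Finset.card_insert_of_notMem hznS, hans]; push_cast; ring
  · have hstep : pvNbrStep p.1 p.2 s d = s := by
      simp only [pvNbrStep, ← hnr, ← hnc]; rw [if_neg hC]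
    rw [hstep]
    have hXS : pvGrid.filter (fun z => pvGet board z.1 z.2 = 0 ∧ z = (nr, nc)) ⊆ S := by
      intro w hw
      obtain ⟨hwg, h0, hwz⟩ := Finset.mem_filter.mp hw
      subst hwz
      obtain ⟨h1, h2, h3, h4⟩ := (pvMem_grid _).mp hwg
      by_contra hns
      have hm := hmask _ hwg
      rw [if_neg hns] at hm
      exact hC ⟨h1, h2, h3, h4, hm.trans h0⟩
    rw [Finset.union_eq_left.mpr hXS]
    exact ⟨hlen, hrows, hmask, hsub, hans⟩

-- folding over any offset list
theorem pvNbr_fold (board : List (List Int)) (hPre : Pre_solution board)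
    (ds : List (Int × Int)) (S : Finset (Int × Int)) (s : List (List Int) × Int)
    (p : Int × Int) (hInv : pvInv board S s) :
    pvInv board (S ∪ pvGrid.filter (fun z => pvGet board z.1 z.2 = 0 ∧
        ∃ d ∈ ds, z = (p.1 + d.1, p.2 + d.2))) (ds.foldl (pvNbrStep p.1 p.2) s) := by
  induction ds generalizing S s with
  | nil =>
    simpa using hInv
  | cons d ds ih =>
    rw [List.foldl_cons]
    have h1 := ih _ _ (pvNbr_step board hPre S s p d hInv)
    have he : (S ∪ pvGrid.filter (fun z => pvGet board z.1 z.2 = 0 ∧ z = (p.1 + d.1, p.2 + d.2)))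
        ∪ pvGrid.filter (fun z => pvGet board z.1 z.2 = 0 ∧ ∃ d' ∈ ds, z = (p.1 + d'.1, p.2 + d'.2))
        = S ∪ pvGrid.filter (fun z => pvGet board z.1 z.2 = 0 ∧
            ∃ d' ∈ d :: ds, z = (p.1 + d'.1, p.2 + d'.2)) := by
      ext w
      simp only [Finset.mem_union, Finset.mem_filter, List.mem_cons]
      constructor
      · rintro ((h | ⟨hg, h0, rfl⟩) | ⟨hg, h0, d', hd', rfl⟩)
        · exact Or.inl h
        · exact Or.inr ⟨hg, h0, d, Or.inl rfl, rfl⟩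
        · exact Or.inr ⟨hg, h0, d', Or.inr hd', rfl⟩
      · rintro (h | ⟨hg, h0, d', (rfl | hd'), rfl⟩)
        · exact Or.inl (Or.inl h)
        · exact Or.inl (Or.inr ⟨hg, h0, rfl⟩)
        · exact Or.inr ⟨hg, h0, d', hd', rfl⟩
    rw [← he]
    exact h1

-- one center preserves the invariant
theorem pvCenter_step (board : List (List Int)) (hPre : Pre_solution board)
    (S : Finset (Int × Int)) (s : List (List Int) × Int) (p : Int × Int)
    (hp : p ∈ pvGrid) (hInv : pvInv board S s) :
    pvInv board (S ∪ pvMarked board [p]) (pvCenter s p.1 p.2) := by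
  have hmask := hInv.2.2.1
  have hsub := hInv.2.2.2.1
  have hmp := hmask p hp
  unfold pvCenter
  by_cases hpS : p ∈ S
  · rw [if_pos hpS] at hmp
    rw [if_neg (by rw [hmp]; norm_num)]
    have hp0 : pvGet board p.1 p.2 = 0 := (hsub p hpS).2
    have : pvMarked board [p] ⊆ S := by
      intro w hw
      obtain ⟨_, _, q, hq, hq1, _⟩ := Finset.mem_filter.mp hw
      rw [List.mem_singleton.mp hq] at hq1
      rw [hp0] at hq1; exact absurd hq1 (by norm_num)
    rw [Finset.union_eq_left.mpr this]
    exact hInv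
  · rw [if_neg hpS] at hmp
    by_cases hp1 : pvGet board p.1 p.2 = 1
    · rw [if_pos (hmp.trans hp1)]
      have h1 := pvNbr_fold board hPre pvOffs S s p hInv
      have he : pvGrid.filter (fun z => pvGet board z.1 z.2 = 0 ∧
            ∃ d ∈ pvOffs, z = (p.1 + d.1, p.2 + d.2)) = pvMarked board [p] := by
        unfold pvMarked
        ext w
        simp only [Finset.mem_filter, List.mem_singleton]
        constructor
        · rintro ⟨hg, h0, d, hd, rfl⟩; exact ⟨hg, h0, p, rfl, hp1, d, hd, rfl⟩
        · rintro ⟨hg, h0, q, rfl, _, d, hd, rfl⟩; exact ⟨hg, h0, d, hd, rfl⟩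
      rw [← he]
      exact h1
    · rw [if_neg (by rw [hmp]; exact hp1)]
      have : pvMarked board [p] ⊆ S := by
        intro w hw
        obtain ⟨_, _, q, hq, hq1, _⟩ := Finset.mem_filter.mp hw
        rw [List.mem_singleton.mp hq] at hq1
        exact absurd hq1 hp1
      rw [Finset.union_eq_left.mpr this]
      exact hInv

-- folding over any list of centers inside the grid
theorem pvCenter_fold (board : List (List Int)) (hPre : Pre_solution board)
    (L : List (Int × Int)) (hL : ∀ p ∈ L, p ∈ pvGrid)
    (S : Finset (Int × Int)) (s : List (List Int) × Int) (hInv : pvInv board S s) :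
    pvInv board (S ∪ pvMarked board L) (L.foldl (fun s p => pvCenter s p.1 p.2) s) := by
  induction L generalizing S s with
  | nil =>
    have : pvMarked board [] = ∅ := by
      unfold pvMarked; ext w; simp
    simpa [this] using hInv
  | cons p L ih =>
    rw [List.foldl_cons]
    have h1 := ih (fun q hq => hL q (List.mem_cons_of_mem _ hq)) _ _
      (pvCenter_step board hPre S s p (hL p List.mem_cons_self) hInv)
    have he : (S ∪ pvMarked board [p]) ∪ pvMarked board L = S ∪ pvMarked board (p :: L) := by
      unfold pvMarked
      ext w
      simp only [Finset.mem_union, Finset.mem_filter, List.mem_cons,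
        List.not_mem_nil, or_false]
      constructor
      · rintro ((h | ⟨hg, h0, q, rfl, hq1, hd⟩) | ⟨hg, h0, q, hq, hq1, hd⟩)
        · exact Or.inl h
        · exact Or.inr ⟨hg, h0, q, Or.inl rfl, hq1, hd⟩
        · exact Or.inr ⟨hg, h0, q, Or.inr hq, hq1, hd⟩
      · rintro (h | ⟨hg, h0, q, (rfl | hq), hq1, hd⟩)
        · exact Or.inl (Or.inl h)
        · exact Or.inl (Or.inr ⟨hg, h0, q, rfl, hq1, hd⟩)
        · exact Or.inr ⟨hg, h0, q, hq, hq1, hd⟩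
    rw [← he]
    exact h1

theorem pvFoldl_nested {σ : Type} (f : σ → Int × Int → σ) (L1 L2 : List Int) (init : σ) :
    L1.foldl (fun s r => L2.foldl (fun s c => f s (r, c)) s) init
      = (L1.flatMap (fun r => L2.map fun c => (r, c))).foldl f init := by
  induction L1 generalizing init with
  | nil => rfl
  | cons r L1 ih => simp [List.foldl_append, List.foldl_map, ih]

theorem pvFoldl_count (P : Int × Int → Prop) [DecidablePred P] (L : List (Int × Int)) (acc : Int) :
    L.foldl (fun acc z => if P z then acc + 1 else acc) acc
      = acc + (L.countP (fun z => decide (P z)) : Int) := by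
  induction L generalizing acc with
  | nil => simp
  | cons z L ih =>
    rw [List.foldl_cons, ih, List.countP_cons]
    by_cases h : P z
    · simp only [if_pos h, decide_eq_true h, if_true]; push_cast; ring
    · simp only [if_neg h, decide_eq_false h, if_false, Bool.false_eq_true, add_zero]

theorem pvOffs_symm : ∀ d ∈ pvOffs, ((-d.1, -d.2) : Int × Int) ∈ pvOffs := by decide

theorem pvAllCells_nodup : pvAllCells.Nodup := by decide

theorem pvPred_iff (board : List (List Int)) (z : Int × Int) :
    (∃ p ∈ pvAllCells, pvGet board p.1 p.2 = 1 ∧ ∃ d ∈ pvOffs, z = (p.1 + d.1, p.2 + d.2))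
      ↔ pvHasOneNbr board z.1 z.2 = true := by
  unfold pvHasOneNbr
  rw [List.any_eq_true]
  constructor
  · rintro ⟨p, hp, hp1, d, hd, rfl⟩
    refine ⟨(-d.1, -d.2), pvOffs_symm d hd, ?_⟩
    obtain ⟨h1, h2, h3, h4⟩ := (pvMem_allCells p).mp hp
    have e1 : p.1 + d.1 + -d.1 = p.1 := by ring
    have e2 : p.2 + d.2 + -d.2 = p.2 := by ring
    simp only [decide_eq_true_iff]
    exact ⟨by simp [e1]; omega, by simp [e1]; omega, by simp [e2]; omega, by simp [e2]; omega,
      by show pvGet board (p.1 + d.1 + -d.1) (p.2 + d.2 + -d.2) = 1; rw [e1, e2]; exact hp1⟩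
  · rintro ⟨d, hd, hcond⟩
    rw [decide_eq_true_iff] at hcond
    obtain ⟨h1, h2, h3, h4, hget⟩ := hcond
    refine ⟨(z.1 + d.1, z.2 + d.2), (pvMem_allCells _).mpr ⟨h1, h2, h3, h4⟩, hget,
      (-d.1, -d.2), pvOffs_symm d hd, ?_⟩
    show z = (z.1 + d.1 + -d.1, z.2 + d.2 + -d.2)
    have : z = (z.1, z.2) := rfl
    rw [this]
    congr 1 <;> ring

theorem solution_spec' (board : List (List Int)) (hPre : Pre_solution board) :
    solution board = solution_alt board := by
  -- A's fold satisfies the invariant, starting from the empty marked set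
  have hInv0 : pvInv board ∅ (board, 0) := by
    refine ⟨rfl, fun i => rfl, fun z hz => by simp, fun z hz => absurd hz (Finset.notMem_empty z),
      by simp⟩
  have hA := pvCenter_fold board hPre pvAllCells
    (fun p hp => (pvMem_grid p).mpr ((pvMem_allCells p).mp hp)) ∅ (board, 0) hInv0
  have hA0 : solution board = (pvAllCells.foldl (fun s p => pvCenter s p.1 p.2) (board, 0)).2 := by
    unfold solution
    exact congrArg Prod.snd (pvFoldl_nested (fun s p => pvCenter s p.1 p.2) _ _ _)
  have hans := hA.2.2.2.2
  -- B as a count over the same cell list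
  have hB0 : solution_alt board = pvAllCells.foldl
      (fun acc z => if pvGet board z.1 z.2 = 0 ∧ pvHasOneNbr board z.1 z.2 = true
        then acc + 1 else acc) 0 := by
    unfold solution_alt
    exact pvFoldl_nested
      (fun acc z => if pvGet board z.1 z.2 = 0 ∧ pvHasOneNbr board z.1 z.2 = true
        then acc + 1 else acc) _ _ _
  have hCnt := pvFoldl_count
    (fun z => pvGet board z.1 z.2 = 0 ∧ pvHasOneNbr board z.1 z.2 = true) pvAllCells 0
  -- A's final marked set is exactly the set B counts
  have hset : pvMarked board pvAllCells
      = (pvAllCells.filter (fun z =>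
          decide (pvGet board z.1 z.2 = 0 ∧ pvHasOneNbr board z.1 z.2 = true))).toFinset := by
    unfold pvMarked
    ext w
    simp only [Finset.mem_filter, List.mem_toFinset, List.mem_filter, decide_eq_true_iff,
      pvMem_grid, ← pvMem_allCells]
    constructor
    · rintro ⟨hg, h0, hex⟩; exact ⟨hg, h0, (pvPred_iff board w).mp hex⟩
    · rintro ⟨hg, h0, hb⟩; exact ⟨hg, h0, (pvPred_iff board w).mpr hb⟩
  rw [hA0, hans, Finset.empty_union, hB0, hCnt, hset,
    List.toFinset_card_of_nodup (pvAllCells_nodup.filter _), ← List.countP_eq_length_filter]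
  omega

-- ===== VERDICT (by name: the statement is the Claim_ definition above) =====
theorem solution_spec : Claim_equal_solution := by
  intro board _ hPre
  unfold Spec_solution
  exact solution_spec' board hPre
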